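-- pv_equiv track=rewrite | github.com/acutkosky/simpleAutograd | einsum.py | get_subscript_lists
-- ===== SOURCE A (Python) =====
-- def get_subscript_lists(subscripts):
--     '''convert list of subscript strings into a list of lists of integers.'''
--     counter = 0
--     chars_to_index = {}
--     subscripts_lists = []
--     for subscript in subscripts:
--         subscript_list = []
--         if subscript == '':
--             # Special case for empty string so that einsum
--             # doesn't complain.
--             subscript_list = [0]
--         for char in subscript:
--             if char not in chars_to_index:
--                 chars_to_index[char] = counter
--                 counter += 1
--             subscript_list.append(chars_to_index[char])
--         subscripts_lists.append(subscript_list)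
--     return subscripts_lists
-- ===== SOURCE B (Python) =====
-- def get_subscript_lists(subscripts):
--     '''convert list of subscript strings into a list of lists of integers.'''
--     joined = ''.join(subscripts)
--     return [[0] if s == '' else [len(set(joined[:joined.index(c)])) for c in s]
--             for s in subscripts]
-- ===== Notes on version B (the rewrite author's own statement) =====
-- stated objective: alternative
-- what changed: B keeps no char-to-index table at all: the index of a character c is computed directly as the number of distinct characters in the concatenation before c's first occurrence (len(set(joined[:joined.index(c)]))), replacing A's stateful counter/dict loop by a stateless per-character rank formula.
import Mathlib
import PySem

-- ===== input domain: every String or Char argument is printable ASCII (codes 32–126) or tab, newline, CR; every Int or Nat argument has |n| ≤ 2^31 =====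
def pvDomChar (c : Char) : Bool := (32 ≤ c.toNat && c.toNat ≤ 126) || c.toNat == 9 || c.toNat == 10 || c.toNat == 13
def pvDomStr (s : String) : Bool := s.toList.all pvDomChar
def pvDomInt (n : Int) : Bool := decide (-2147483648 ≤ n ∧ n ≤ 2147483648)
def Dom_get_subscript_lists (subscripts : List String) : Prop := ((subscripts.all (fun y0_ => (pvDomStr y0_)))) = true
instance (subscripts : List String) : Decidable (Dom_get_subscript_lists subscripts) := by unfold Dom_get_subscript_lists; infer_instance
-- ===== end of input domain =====

-- B keeps no char→index table: each character's index is its rank, the number of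
-- distinct characters before its first occurrence in the concatenation; objective:
-- alternative (stateless rank formula instead of A's counter/dict state). Total; no Pre_.

-- ===== PORT A =====
-- one iteration of "for char in subscript": the membership test, conditional insert
-- with the running counter, then the append of chars_to_index[char] (the key is always
-- present at the lookup, so getD's default 0 is never used)
def aChar (st : Int × PySem.Dict Char Int × List Int) (ch : Char) :
    Int × PySem.Dict Char Int × List Int :=
  let (counter, d, lst) := st
  let (counter', d') := if d.contains ch then (counter, d) else (counter + 1, d.insert ch counter)
  (counter', d', lst ++ [d'.getD ch 0])

-- one iteration of "for subscript in subscripts"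
def aSub (st : Int × PySem.Dict Char Int × List (List Int)) (s : String) :
    Int × PySem.Dict Char Int × List (List Int) :=
  let (counter, d, out) := st
  let init : List Int := if s = "" then [0] else []
  let (counter', d', lst) := s.toList.foldl aChar (counter, d, init)
  (counter', d', out ++ [lst])

def get_subscript_lists (subscripts : List String) : List (List Int) :=
  (subscripts.foldl aSub (0, PySem.Dict.empty, [])).2.2

-- ===== PORT B =====
def get_subscript_lists_alt (subscripts : List String) : List (List Int) :=
  -- ''.join(subscripts) is only indexed/sliced char by char, so it is the flatMap of toList
  let joined := subscripts.flatMap String.toList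
  -- joined.index(c): c occurs in its own subscript hence in joined, so .index never raises
  -- and equals List.idxOf; joined[:k] with 0 ≤ k ≤ len is exactly List.take k
  subscripts.map (fun s => if s = "" then [0] else
    s.toList.map (fun c =>
      ((PySem.Set.ofList (joined.take (List.idxOf c joined))).length : Int)))

-- ===== PRECONDITION & SPEC =====
def Spec_get_subscript_lists (subscripts : List String) (out : List (List Int)) : Prop := out = get_subscript_lists_alt subscripts
instance (subscripts : List String) (out : List (List Int)) : Decidable (Spec_get_subscript_lists subscripts out) := by unfold Spec_get_subscript_lists; infer_instance

-- ===== CLAIM (what is proved, stated in full; the proofs are below) =====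
def Claim_equal_get_subscript_lists : Prop := ∀ (subscripts : List String), Dom_get_subscript_lists subscripts → Spec_get_subscript_lists subscripts (get_subscript_lists subscripts)

-- ===== LEMMAS AND PROOFS =====

-- proof-side model of A's dict after having seen the distinct characters u, in order
def dictOf (u : List Char) : PySem.Dict Char Int :=
  (PySem.List.enumerate u 0).foldl (fun d p => d.insert p.2 p.1) PySem.Dict.empty

theorem dictOf_snoc (u : List Char) (c : Char) :
    dictOf (u ++ [c]) = (dictOf u).insert c (u.length : Int) := by
  simp [dictOf, PySem.List.enumerate_append, PySem.List.enumerate_cons, PySem.List.enumerate_nil,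
    List.foldl_append]

theorem get?_dictOf (u : List Char) (hu : u.Nodup) (c : Char) :
    (dictOf u).get? c = if c ∈ u then some ((u.idxOf c : Nat) : Int) else none := by
  induction u using List.reverseRecOn with
  | nil => simp [dictOf, PySem.List.enumerate_nil]
  | append_singleton u x ih =>
    have hx : x ∉ u := by simp [List.nodup_append] at hu; tauto
    have hu' : u.Nodup := (List.nodup_append.mp hu).1
    rw [dictOf_snoc, PySem.Dict.get?_insert, ih hu']
    by_cases hcx : c = x
    · subst hcx
      simp [hx, List.idxOf_append_of_notMem hx]
    · by_cases hcu : c ∈ u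
      · simp [hcx, hcu, List.idxOf_append_of_mem hcu]
      · simp [hcx, hcu]

theorem getD_dictOf (u : List Char) (hu : u.Nodup) (c : Char) (hc : c ∈ u) :
    (dictOf u).getD c 0 = ((u.idxOf c : Nat) : Int) := by
  rw [PySem.Dict.getD_eq_get?_getD, get?_dictOf u hu c, if_pos hc, Option.getD_some]

theorem contains_dictOf (u : List Char) (hu : u.Nodup) (c : Char) :
    (dictOf u).contains c = decide (c ∈ u) := by
  rw [PySem.Dict.contains_eq_isSome_get?, get?_dictOf u hu c]
  by_cases hc : c ∈ u <;> simp [hc]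

theorem update_eq_append (u : List Char) (cs : List Char) :
    ∃ t, PySem.Set.update u cs = u ++ t :=
  ⟨_, PySem.Set.update_eq_append_filter u cs⟩

theorem idxOf_update_of_mem (u : List Char) (cs : List Char) (c : Char) (hc : c ∈ u) :
    (PySem.Set.update u cs).idxOf c = u.idxOf c := by
  obtain ⟨t, ht⟩ := update_eq_append u cs
  rw [ht, List.idxOf_append_of_mem hc]

theorem inner_loop (cs : List Char) : ∀ (u : List Char) (lst : List Int), u.Nodup →
    cs.foldl aChar ((u.length : Int), dictOf u, lst)
      = (((PySem.Set.update u cs).length : Int), dictOf (PySem.Set.update u cs),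
          lst ++ cs.map (fun c => (((PySem.Set.update u cs).idxOf c : Nat) : Int))) := by
  induction cs with
  | nil => intro u lst hu; simp [PySem.Set.update_nil]
  | cons c cs ih =>
    intro u lst hu
    rw [List.foldl_cons, PySem.Set.update_cons]
    by_cases hc : c ∈ u
    · have hstep : aChar ((u.length : Int), dictOf u, lst) c
          = ((u.length : Int), dictOf u, lst ++ [((u.idxOf c : Nat) : Int)]) := by
        simp [aChar, contains_dictOf u hu, hc, getD_dictOf u hu c hc]
      rw [hstep, PySem.Set.add_of_mem hc, ih u _ hu]
      simp [idxOf_update_of_mem u cs c hc]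
    · have hnd : (u ++ [c]).Nodup := by
        simp [List.nodup_append, hu]
        exact fun a ha h => hc (h ▸ ha)
      have hd : (dictOf u).insert c (u.length : Int) = dictOf (u ++ [c]) :=
        (dictOf_snoc u c).symm
      have hval : (dictOf (u ++ [c])).getD c 0 = ((u.length : Nat) : Int) := by
        rw [getD_dictOf _ hnd c (by simp), List.idxOf_append_of_notMem hc]
        simp
      have hstep : aChar ((u.length : Int), dictOf u, lst) c
          = (((u ++ [c]).length : Int), dictOf (u ++ [c]), lst ++ [((u.length : Nat) : Int)]) := by
        simp [aChar, contains_dictOf u hu, hc, hd, hval]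
      rw [hstep, PySem.Set.add_of_not_mem hc, ih (u ++ [c]) _ hnd]
      have hcidx : (PySem.Set.update (u ++ [c]) cs).idxOf c = u.length := by
        rw [idxOf_update_of_mem (u ++ [c]) cs c (by simp), List.idxOf_append_of_notMem hc]
        simp
      simp [hcidx]

theorem outer_loop (subs : List String) : ∀ (u : List Char) (acc : List (List Int)), u.Nodup →
    subs.foldl aSub ((u.length : Int), dictOf u, acc)
      = (((PySem.Set.update u (subs.flatMap String.toList)).length : Int),
          dictOf (PySem.Set.update u (subs.flatMap String.toList)),
          acc ++ subs.map (fun s => if s = "" then [0] else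
            s.toList.map (fun c =>
              (((PySem.Set.update u (subs.flatMap String.toList)).idxOf c : Nat) : Int)))) := by
  induction subs with
  | nil => intro u acc hu; simp [PySem.Set.update_nil]
  | cons s subs ih =>
    intro u acc hu
    rw [List.foldl_cons]
    have hstep : aSub ((u.length : Int), dictOf u, acc) s
        = (((PySem.Set.update u s.toList).length : Int), dictOf (PySem.Set.update u s.toList),
            acc ++ [if s = "" then [0] else
              s.toList.map (fun c => (((PySem.Set.update u s.toList).idxOf c : Nat) : Int))]) := by
      simp only [aSub, inner_loop s.toList u _ hu]
      by_cases hs : s = "" <;> simp [hs]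
    rw [hstep, ih (PySem.Set.update u s.toList) _ (PySem.Set.nodup_update _ _ hu)]
    have hflat : (s :: subs).flatMap String.toList = s.toList ++ subs.flatMap String.toList := by
      simp
    rw [hflat, PySem.Set.update_append]
    have hhead : (if s = "" then ([0] : List Int) else
          s.toList.map (fun c => (((PySem.Set.update u s.toList).idxOf c : Nat) : Int)))
        = (if s = "" then [0] else
          s.toList.map (fun c =>
            (((PySem.Set.update (PySem.Set.update u s.toList) (subs.flatMap String.toList)).idxOf c : Nat) : Int))) := by
      by_cases hs : s = ""
      · simp [hs]
      · rw [if_neg hs, if_neg hs]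
        apply List.map_congr_left
        intro c hcmem
        rw [idxOf_update_of_mem (PySem.Set.update u s.toList) (subs.flatMap String.toList) c
          (by simp [PySem.Set.mem_update, hcmem])]
    simp only [List.map_cons]
    rw [hhead]
    simp

-- the rank formula: the position of c in the running distinct-character list equals the
-- number of distinct characters strictly before c's first occurrence
theorem rank_update (j : List Char) : ∀ (u : List Char), u.Nodup → ∀ c, c ∈ j → c ∉ u →
    (PySem.Set.update u j).idxOf c = (PySem.Set.update u (j.take (j.idxOf c))).length := by
  induction j with
  | nil => intro u _ c hc; simp at hc
  | cons x t ih =>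
    intro u hu c hc hcu
    by_cases hcx : c = x
    · subst hcx
      rw [List.idxOf_cons_self]
      simp only [List.take_zero, PySem.Set.update_nil]
      rw [PySem.Set.update_cons, PySem.Set.add_of_not_mem hcu]
      rw [idxOf_update_of_mem (u ++ [c]) t c (by simp), List.idxOf_append_of_notMem hcu]
      simp
    · have hct : c ∈ t := by cases hc with | head => exact absurd rfl hcx | tail _ h => exact h
      have hidx : (x :: t).idxOf c = t.idxOf c + 1 := by
        simp [Ne.symm hcx]
      rw [hidx]
      simp only [List.take_succ_cons]
      rw [PySem.Set.update_cons, PySem.Set.update_cons]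
      have hcu' : c ∉ PySem.Set.add u x := by
        intro h
        rcases (PySem.Set.mem_add _ _ _).mp h with h' | h'
        · exact hcu h'
        · exact hcx h'
      exact ih (PySem.Set.add u x) (PySem.Set.nodup_add _ _ hu) c hct hcu'

theorem rank_eq (j : List Char) (c : Char) (hc : c ∈ j) :
    (PySem.Set.ofList j).idxOf c = (PySem.Set.ofList (j.take (j.idxOf c))).length := by
  rw [← PySem.Set.update_nil_left, ← PySem.Set.update_nil_left]
  exact rank_update j [] List.nodup_nil c hc (by simp)

-- ===== VERDICT (by name: the statement is the Claim_ definition above) =====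
theorem get_subscript_lists_spec : Claim_equal_get_subscript_lists := by
  intro subs _
  unfold Spec_get_subscript_lists get_subscript_lists get_subscript_lists_alt
  have h0 : ((0 : Int), PySem.Dict.empty, ([] : List (List Int)))
      = ((([] : List Char).length : Int), dictOf [], ([] : List (List Int))) := by
    simp [dictOf, PySem.List.enumerate_nil]
  rw [h0, outer_loop subs [] [] List.nodup_nil]
  simp only [PySem.Set.update_nil_left, List.nil_append]
  apply List.map_congr_left
  intro s hs
  by_cases hse : s = ""
  · simp [hse]
  · rw [if_neg hse, if_neg hse]
    apply List.map_congr_left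
    intro c hc
    have hcj : c ∈ subs.flatMap String.toList := List.mem_flatMap.mpr ⟨s, hs, hc⟩
    rw [rank_eq (subs.flatMap String.toList) c hcj]
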